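-- pv_equiv track=rewrite | github.com/fairuzald/Tubes-1-Stima | bin/stack_all.py | get_sequences_candidate
-- ===== SOURCE A (Python) =====
-- def get_sequences_candidate(buffer, axis, current_position, col_matrix, row_matrix):
--     stack = [(buffer, axis, current_position, ())]
--     result = []
--
--     while stack:
--         buffer, axis, current_position, sequence = stack.pop()
--
--         next_move = [(i + 1, current_position) if axis == 'x' else (current_position, i + 1) for i in range(col_matrix if axis == 'x' else row_matrix)]
--
--         if buffer == 1:
--             result.extend([sequence + ((x, y),) for x, y in next_move if (x, y) not in sequence])
--         else:
--             for x, y in next_move: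
--                 if (x, y) not in sequence:
--                     stack.append((buffer - 1, ('y' if axis == 'x' else 'x'), (x if axis == 'x' else y), sequence + ((x, y),)))
--
--     return result
-- ===== SOURCE B (Python) =====
-- def get_sequences_candidate(buffer, axis, current_position, col_matrix, row_matrix):
--     def rec(buffer, axis, pos, seq):
--         next_move = [(i + 1, pos) if axis == 'x' else (pos, i + 1)
--                      for i in range(col_matrix if axis == 'x' else row_matrix)]
--         if buffer == 1:
--             return [seq + ((x, y),) for x, y in next_move if (x, y) not in seq]
--         out = []
--         for x, y in reversed(next_move):
--             if (x, y) not in seq: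
--                 out += rec(buffer - 1, 'y' if axis == 'x' else 'x',
--                            x if axis == 'x' else y, seq + ((x, y),))
--         return out
--     return rec(buffer, axis, current_position, ())
-- ===== Notes on version B (the rewrite author's own statement) =====
-- stated objective: alternative
-- what changed: Replaced the explicit stack machine (while loop popping tuples off a manual stack) by a direct recursive DFS helper that emits leaf extensions in forward order and recurses over valid moves in reversed order at internal levels, reproducing the stack's LIFO output order.
import Mathlib
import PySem

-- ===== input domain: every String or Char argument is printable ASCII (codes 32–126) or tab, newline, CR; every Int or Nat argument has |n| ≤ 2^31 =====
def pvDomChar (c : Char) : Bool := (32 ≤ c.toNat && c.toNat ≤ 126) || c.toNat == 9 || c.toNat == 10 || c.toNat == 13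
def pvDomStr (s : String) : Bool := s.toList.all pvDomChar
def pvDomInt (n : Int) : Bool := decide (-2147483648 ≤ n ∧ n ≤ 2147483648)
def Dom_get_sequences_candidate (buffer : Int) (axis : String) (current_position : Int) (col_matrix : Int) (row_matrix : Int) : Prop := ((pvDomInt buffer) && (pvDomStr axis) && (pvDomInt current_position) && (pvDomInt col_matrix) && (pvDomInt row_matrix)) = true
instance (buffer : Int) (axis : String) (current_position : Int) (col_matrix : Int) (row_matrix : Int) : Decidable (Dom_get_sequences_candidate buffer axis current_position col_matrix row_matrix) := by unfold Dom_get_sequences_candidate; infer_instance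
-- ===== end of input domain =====

-- B replaces A's explicit stack machine by direct recursion on the search tree (reversed
-- sibling order at internal levels, forward at the leaves), same results: objective 'alternative'.
-- Both ports carry a per-branch fuel counter purely as a totality guard (large enough that it
-- is never exhausted on terminating Python runs; equality of the two ports holds for any fuel).

-- shared helper: Python's `next_move` comprehension (identical line in A and B)
def pvMoves (axis : String) (pos col row : Int) : List (Int × Int) :=
  (PySem.List.pyRange 0 (if axis == "x" then col else row) 1).map
    (fun i => if axis == "x" then (i + 1, pos) else (pos, i + 1))

-- helper for the termination measure of pvStack (cited in its decreasing_by)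
lemma pv_sum_map_comp_le {α β : Type _} (l : List α) (g : β → Nat) (mk : α → β) (c : Nat)
    (h : ∀ a ∈ l, g (mk a) ≤ c) : (l.map (g ∘ mk)).sum ≤ l.length * c := by
  induction l with
  | nil => simp
  | cons x xs ih =>
    simp only [List.map_cons, List.sum_cons, List.length_cons, Function.comp_apply]
    have := h x (by simp)
    have := ih (fun a ha => h a (by simp [ha]))
    nlinarith

-- ===== PORT A =====
-- A's while-loop over an explicit stack (Lean list head = Python stack top).
def pvStack (col row : Int) (stack : List (Nat × Int × String × Int × List (Int × Int)))
    (result : List (List (Int × Int))) : List (List (Int × Int)) :=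
  match stack with
  | [] => result
  | (f, buffer, axis, pos, seq) :: rest =>
    if buffer == 1 then
      pvStack col row rest
        (result ++ ((pvMoves axis pos col row).filter (fun m => !(seq.contains m))).map
          (fun m => seq ++ [m]))
    else
      match f with
      | 0 => pvStack col row rest result
      | Nat.succ f' =>
        pvStack col row
          ((((pvMoves axis pos col row).filter (fun m => !(seq.contains m))).map
            (fun m => (f', buffer - 1, (if axis == "x" then "y" else "x"),
                       (if axis == "x" then m.1 else m.2), seq ++ [m]))).reverse ++ rest)
          result
  termination_by ((stack.map (fun e => (max col.toNat row.toNat + 1) ^ (e.1 + 1))).sum)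
  decreasing_by
  · simp
  · simp
  · simp only [List.map_append, List.sum_append, List.map_reverse, List.sum_reverse,
      List.map_map, List.map_cons, List.sum_cons, Nat.succ_eq_add_one]
    refine lt_of_le_of_lt (Nat.add_le_add_right
      (pv_sum_map_comp_le _ _ _ ((max col.toNat row.toNat + 1) ^ (f' + 1))
        (fun a _ => Nat.le_of_eq rfl)) _) ?_
    have hlen : (((pvMoves axis pos col row).filter (fun m => !(seq.contains m))).length)
        ≤ max col.toNat row.toNat := by
      calc (((pvMoves axis pos col row).filter (fun m => !(seq.contains m))).length)
          ≤ (pvMoves axis pos col row).length := List.length_filter_le _ _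
        _ ≤ max col.toNat row.toNat := by
            simp [pvMoves, PySem.List.length_pyRange_one]
            split <;> omega
    have hpow : 0 < (max col.toNat row.toNat + 1) ^ (f' + 1) := Nat.pow_pos (by omega)
    have hlt : (((pvMoves axis pos col row).filter (fun m => !(seq.contains m))).length)
        * (max col.toNat row.toNat + 1) ^ (f' + 1)
        < (max col.toNat row.toNat + 1) ^ (f' + 1 + 1) := by
      calc _ ≤ (max col.toNat row.toNat) * (max col.toNat row.toNat + 1) ^ (f' + 1) :=
            Nat.mul_le_mul_right _ hlen
        _ < (max col.toNat row.toNat + 1) * (max col.toNat row.toNat + 1) ^ (f' + 1) :=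
            (Nat.mul_lt_mul_right hpow).mpr (by omega)
        _ = (max col.toNat row.toNat + 1) ^ (f' + 1 + 1) := by rw [pow_succ]; ring
    linarith [hlt]

-- fuel: generous per-branch depth bound (depth ≤ buffer, or ≤ #distinct cells + 2 when buffer ≤ 0)
def pvFuel (buffer col row : Int) : Nat :=
  buffer.toNat + (max col.toNat row.toNat) * (max col.toNat row.toNat) + 3

def get_sequences_candidate (buffer : Int) (axis : String) (current_position : Int) (col_matrix : Int) (row_matrix : Int) : List (List (Int × Int)) :=
  pvStack col_matrix row_matrix
    [(pvFuel buffer col_matrix row_matrix, buffer, axis, current_position, [])] []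

-- ===== PORT B =====
-- B's recursive DFS: leaves emitted forward, internal siblings in reversed order.
def pvRec (col row : Int) (fuel : Nat) (buffer : Int) (axis : String) (pos : Int)
    (seq : List (Int × Int)) : List (List (Int × Int)) :=
  if buffer == 1 then
    ((pvMoves axis pos col row).filter (fun m => !(seq.contains m))).map (fun m => seq ++ [m])
  else
    match fuel with
    | 0 => []
    | Nat.succ f' =>
      ((pvMoves axis pos col row).reverse.filter (fun m => !(seq.contains m))).flatMap
        (fun m => pvRec col row f' (buffer - 1) (if axis == "x" then "y" else "x")
          (if axis == "x" then m.1 else m.2) (seq ++ [m]))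
  termination_by fuel

def get_sequences_candidate_alt (buffer : Int) (axis : String) (current_position : Int) (col_matrix : Int) (row_matrix : Int) : List (List (Int × Int)) :=
  pvRec col_matrix row_matrix (pvFuel buffer col_matrix row_matrix) buffer axis current_position []

-- ===== PRECONDITION & SPEC =====
def Spec_get_sequences_candidate (buffer : Int) (axis : String) (current_position : Int) (col_matrix : Int) (row_matrix : Int) (out : List (List (Int × Int))) : Prop := out = get_sequences_candidate_alt buffer axis current_position col_matrix row_matrix
instance (buffer : Int) (axis : String) (current_position : Int) (col_matrix : Int) (row_matrix : Int) (out : List (List (Int × Int))) : Decidable (Spec_get_sequences_candidate buffer axis current_position col_matrix row_matrix out) := by unfold Spec_get_sequences_candidate; infer_instance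

-- ===== CLAIM (what is proved, stated in full; the proofs are below) =====
def Claim_equal_get_sequences_candidate : Prop := ∀ (buffer : Int) (axis : String) (current_position : Int) (col_matrix : Int) (row_matrix : Int), Dom_get_sequences_candidate buffer axis current_position col_matrix row_matrix → Spec_get_sequences_candidate buffer axis current_position col_matrix row_matrix (get_sequences_candidate buffer axis current_position col_matrix row_matrix)

-- ===== LEMMAS AND PROOFS =====

-- unfolding equations for pvRec (one per branch of its body)
lemma pvRec_leaf (col row : Int) (f : Nat) (buffer : Int) (axis : String) (pos : Int)
    (seq : List (Int × Int)) (h : (buffer == 1) = true) :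
    pvRec col row f buffer axis pos seq
      = ((pvMoves axis pos col row).filter (fun m => !(seq.contains m))).map (fun m => seq ++ [m]) := by
  rw [pvRec.eq_def]; simp [h]

lemma pvRec_zero (col row : Int) (buffer : Int) (axis : String) (pos : Int)
    (seq : List (Int × Int)) (h : ¬(buffer == 1) = true) :
    pvRec col row 0 buffer axis pos seq = [] := by
  rw [pvRec.eq_def]; simp [h]

lemma pvRec_succ (col row : Int) (f' : Nat) (buffer : Int) (axis : String) (pos : Int)
    (seq : List (Int × Int)) (h : ¬(buffer == 1) = true) :
    pvRec col row (f'.succ) buffer axis pos seq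
      = ((pvMoves axis pos col row).reverse.filter (fun m => !(seq.contains m))).flatMap
          (fun m => pvRec col row f' (buffer - 1) (if axis == "x" then "y" else "x")
            (if axis == "x" then m.1 else m.2) (seq ++ [m])) := by
  rw [pvRec.eq_def]; simp [h]

-- the stack machine computes, in order, the concatenation of the DFS results of its entries
lemma pvStack_eq (col row : Int) (stack : List (Nat × Int × String × Int × List (Int × Int)))
    (result : List (List (Int × Int))) :
    pvStack col row stack result
      = result ++ (stack.map (fun e => pvRec col row e.1 e.2.1 e.2.2.1 e.2.2.2.1 e.2.2.2.2)).flatten := by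
  induction stack, result using pvStack.induct col row with
  | case1 result => rw [pvStack.eq_def]; simp
  | case2 result f buffer axis pos seq rest h ih =>
    rw [pvStack.eq_def]
    simp only [if_pos h]
    rw [ih, List.map_cons, List.flatten_cons, pvRec_leaf col row f buffer axis pos seq h]
    simp [List.append_assoc]
  | case3 result buffer axis pos seq rest h ih =>
    rw [pvStack.eq_def]
    simp only [if_neg h]
    rw [ih, List.map_cons, List.flatten_cons, pvRec_zero col row buffer axis pos seq h]
    simp
  | case4 result buffer axis pos seq rest h f' ih =>
    rw [pvStack.eq_def]
    simp only [if_neg h]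
    refine ih.trans ?_
    conv_rhs => rw [List.map_cons, List.flatten_cons, pvRec_succ col row f' buffer axis pos seq h]
    simp only [List.map_append, List.flatten_append, ← List.append_assoc]
    congr 1
    congr 1
    rw [List.filter_reverse, ← List.map_reverse, List.map_map]
    rfl

-- ===== VERDICT (by name: the statement is the Claim_ definition above) =====
theorem get_sequences_candidate_spec : Claim_equal_get_sequences_candidate := by
  intro buffer axis current_position col_matrix row_matrix _
  unfold Spec_get_sequences_candidate get_sequences_candidate get_sequences_candidate_alt
  rw [pvStack_eq]
  simp
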